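-- pv_equiv track=rewrite | github.com/serkiolara/embedded-systems | tools/scripts/ocr_server.py | fix_plate
-- ===== SOURCE A (Python) =====
-- def fix_plate(text):
--     """
--     Apply position-aware OCR correction for Mexican plates.
--     Format: AAA000A (3 letters, 3 digits, 1 optional letter)
--     Also handles AAA000 (6 chars).
--     Only corrects chars in the digit positions (3,4,5).
--     """
--     if len(text) < 6:
--         return text
--
--     # Digit position corrections: chars that look like digits but OCR reads as letters
--     digit_fixes = {'O': '0', 'N': '0', 'D': '0', 'U': '0', 'Q': '0',
--                    'I': '1', 'L': '1', 'Z': '2', 'S': '5', 'G': '6', 'B': '8'}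
--     # Letter position corrections: digits that look like letters
--     letter_fixes = {'0': 'O', '1': 'I', '5': 'S', '8': 'B', '6': 'G', '2': 'Z'}
--
--     chars = list(text)
--
--     # Positions 0,1,2 should be letters
--     for i in range(min(3, len(chars))):
--         if chars[i] in letter_fixes:
--             chars[i] = letter_fixes[chars[i]]
--
--     # Positions 3,4,5 should be digits
--     for i in range(3, min(6, len(chars))):
--         if chars[i] in digit_fixes:
--             chars[i] = digit_fixes[chars[i]]
--
--     # Position 6 (if present) should be a letter
--     if len(chars) > 6 and chars[6] in letter_fixes:
--         chars[6] = letter_fixes[chars[6]]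
--
--     return "".join(chars)
-- ===== SOURCE B (Python) =====
-- # B: one symmetric confusion-pair table scanned in both directions, applied by a
-- # single recursive pass that consumes the characters with a position counter,
-- # instead of A's two dicts and three separate index loops.
-- _PAIRS = [('O', '0'), ('N', '0'), ('D', '0'), ('U', '0'), ('Q', '0'),
--           ('I', '1'), ('L', '1'), ('Z', '2'), ('S', '5'), ('G', '6'), ('B', '8')]
--
--
-- def _to_digit(c):
--     for letter, digit in _PAIRS:
--         if letter == c:
--             return digit
--     return c
--
--
-- def _to_letter(c):
--     for letter, digit in _PAIRS:
--         if digit == c: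
--             return letter
--     return c
--
--
-- def _go(chars, i):
--     if not chars or i >= 7:
--         return chars
--     head = _to_digit(chars[0]) if 3 <= i < 6 else _to_letter(chars[0])
--     return [head] + _go(chars[1:], i + 1)
--
--
-- def fix_plate(text):
--     if len(text) < 6:
--         return text
--     return "".join(_go(list(text), 0))
-- ===== Notes on version B (the rewrite author's own statement) =====
-- stated objective: alternative
-- what changed: A's three staged index loops over two hard-coded dicts are replaced by a single recursive pass that consumes the character list with a position counter, deriving both correction directions (letter->digit and digit->letter) by first-match scans of one shared confusion-pair table.
import Mathlib
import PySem

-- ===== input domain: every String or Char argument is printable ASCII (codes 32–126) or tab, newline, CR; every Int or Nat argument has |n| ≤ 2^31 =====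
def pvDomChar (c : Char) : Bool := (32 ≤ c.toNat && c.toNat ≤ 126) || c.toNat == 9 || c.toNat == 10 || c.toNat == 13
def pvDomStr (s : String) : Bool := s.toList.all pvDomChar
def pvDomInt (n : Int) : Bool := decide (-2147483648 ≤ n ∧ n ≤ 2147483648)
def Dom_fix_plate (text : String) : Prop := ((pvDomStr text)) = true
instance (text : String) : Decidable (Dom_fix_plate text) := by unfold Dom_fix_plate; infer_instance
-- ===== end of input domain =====

-- B replaces A's three staged index loops over two dicts by one recursive pass with a
-- position counter over a single confusion-pair table scanned in both directions; objective: alternative.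

-- ===== PORT A =====
def fpDigitFixes : PySem.Dict Char Char :=
  PySem.Dict.ofList [('O','0'),('N','0'),('D','0'),('U','0'),('Q','0'),
                     ('I','1'),('L','1'),('Z','2'),('S','5'),('G','6'),('B','8')]
def fpLetterFixes : PySem.Dict Char Char :=
  PySem.Dict.ofList [('0','O'),('1','I'),('5','S'),('8','B'),('6','G'),('2','Z')]
def fpStep (fixes : PySem.Dict Char Char) (cs : List Char) (i : Int) : List Char :=
  match PySem.List.pyGet? cs i with
  | some c =>
      match fixes.get? c with
      | some v => PySem.List.pySetD cs i v
      | none => cs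
  | none => cs
-- "".join(chars) on a list of single chars = String.ofList (exact)
def fix_plate (text : String) : String :=
  if PySem.Str.len text < 6 then text
  else
    let chars := text.toList
    let chars := (PySem.List.pyRange 0 (min 3 (PySem.List.len chars)) 1).foldl (fpStep fpLetterFixes) chars
    let chars := (PySem.List.pyRange 3 (min 6 (PySem.List.len chars)) 1).foldl (fpStep fpDigitFixes) chars
    let chars :=
      if PySem.List.len chars > 6 then
        match PySem.List.pyGet? chars 6 with
        | some c =>
            match fpLetterFixes.get? c with
            | some v => PySem.List.pySetD chars 6 v
            | none => chars
        | none => chars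
      else chars
    String.ofList chars

-- ===== PORT B =====
def fpPairs : List (Char × Char) :=
  [('O','0'),('N','0'),('D','0'),('U','0'),('Q','0'),
   ('I','1'),('L','1'),('Z','2'),('S','5'),('G','6'),('B','8')]
-- the Python 'for … if … return' first-match loop is List.find? (exact)
def fpToDigit (c : Char) : Char :=
  match fpPairs.find? (fun p => p.1 == c) with
  | some p => p.2
  | none => c
def fpToLetter (c : Char) : Char :=
  match fpPairs.find? (fun p => p.2 == c) with
  | some p => p.1
  | none => c
def fpGo : List Char → Nat → List Char
  | [], _ => []
  | c :: cs, i =>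
      if 7 ≤ i then c :: cs
      else (if 3 ≤ i ∧ i < 6 then fpToDigit c else fpToLetter c) :: fpGo cs (i + 1)
def fix_plate_alt (text : String) : String :=
  if PySem.Str.len text < 6 then text
  else String.ofList (fpGo text.toList 0)

-- ===== PRECONDITION & SPEC =====
def Spec_fix_plate (text : String) (out : String) : Prop := out = fix_plate_alt text
instance (text : String) (out : String) : Decidable (Spec_fix_plate text out) := by unfold Spec_fix_plate; infer_instance

-- ===== CLAIM (what is proved, stated in full; the proofs are below) =====
def Claim_equal_fix_plate : Prop := ∀ (text : String), Dom_fix_plate text → Spec_fix_plate text (fix_plate text)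

-- ===== LEMMAS AND PROOFS =====
theorem fp_toLetter_eq (c : Char) : fpToLetter c = (fpLetterFixes.get? c).getD c := by
  have hd : fpLetterFixes = PySem.Dict.mk
      [('0','O'),('1','I'),('5','S'),('8','B'),('6','G'),('2','Z')] := by decide
  by_cases h0 : c = '0'; · subst h0; decide
  by_cases h1 : c = '1'; · subst h1; decide
  by_cases h2 : c = '2'; · subst h2; decide
  by_cases h5 : c = '5'; · subst h5; decide
  by_cases h6 : c = '6'; · subst h6; decide
  by_cases h8 : c = '8'; · subst h8; decide
  have e0 : ('0' == c) = false := beq_eq_false_iff_ne.mpr (Ne.symm h0)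
  have e1 : ('1' == c) = false := beq_eq_false_iff_ne.mpr (Ne.symm h1)
  have e2 : ('2' == c) = false := beq_eq_false_iff_ne.mpr (Ne.symm h2)
  have e5 : ('5' == c) = false := beq_eq_false_iff_ne.mpr (Ne.symm h5)
  have e6 : ('6' == c) = false := beq_eq_false_iff_ne.mpr (Ne.symm h6)
  have e8 : ('8' == c) = false := beq_eq_false_iff_ne.mpr (Ne.symm h8)
  simp [fpToLetter, fpPairs, List.find?, hd, PySem.Dict.get?, e0, e1, e2, e5, e6, e8]

theorem fp_toDigit_eq (c : Char) : fpToDigit c = (fpDigitFixes.get? c).getD c := by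
  have hd : fpDigitFixes = PySem.Dict.mk
      [('O','0'),('N','0'),('D','0'),('U','0'),('Q','0'),
       ('I','1'),('L','1'),('Z','2'),('S','5'),('G','6'),('B','8')] := by decide
  by_cases hO : c = 'O'; · subst hO; decide
  by_cases hN : c = 'N'; · subst hN; decide
  by_cases hD : c = 'D'; · subst hD; decide
  by_cases hU : c = 'U'; · subst hU; decide
  by_cases hQ : c = 'Q'; · subst hQ; decide
  by_cases hI : c = 'I'; · subst hI; decide
  by_cases hL : c = 'L'; · subst hL; decide
  by_cases hZ : c = 'Z'; · subst hZ; decide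
  by_cases hS : c = 'S'; · subst hS; decide
  by_cases hG : c = 'G'; · subst hG; decide
  by_cases hB : c = 'B'; · subst hB; decide
  have eO : ('O' == c) = false := beq_eq_false_iff_ne.mpr (Ne.symm hO)
  have eN : ('N' == c) = false := beq_eq_false_iff_ne.mpr (Ne.symm hN)
  have eD : ('D' == c) = false := beq_eq_false_iff_ne.mpr (Ne.symm hD)
  have eU : ('U' == c) = false := beq_eq_false_iff_ne.mpr (Ne.symm hU)
  have eQ : ('Q' == c) = false := beq_eq_false_iff_ne.mpr (Ne.symm hQ)
  have eI : ('I' == c) = false := beq_eq_false_iff_ne.mpr (Ne.symm hI)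
  have eL : ('L' == c) = false := beq_eq_false_iff_ne.mpr (Ne.symm hL)
  have eZ : ('Z' == c) = false := beq_eq_false_iff_ne.mpr (Ne.symm hZ)
  have eS : ('S' == c) = false := beq_eq_false_iff_ne.mpr (Ne.symm hS)
  have eG : ('G' == c) = false := beq_eq_false_iff_ne.mpr (Ne.symm hG)
  have eB : ('B' == c) = false := beq_eq_false_iff_ne.mpr (Ne.symm hB)
  simp [fpToDigit, fpPairs, List.find?, hd, PySem.Dict.get?, eO, eN, eD, eU, eQ, eI, eL, eZ, eS, eG, eB]

theorem fpGo_seven (xs : List Char) : fpGo xs 7 = xs := by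
  cases xs <;> simp [fpGo]

theorem fpStep_zero (fx : PySem.Dict Char Char) (x : Char) (cs : List Char) :
    fpStep fx (x::cs) 0 = ((fx.get? x).getD x) :: cs := by
  cases h : fx.get? x <;>
    simp [fpStep, h, PySem.List.pyGet?, PySem.List.pySetD, PySem.List.pyIdx?, PySem.List.pySet?]

theorem fpStep_succ (fx : PySem.Dict Char Char) (x : Char) (cs : List Char) (n : Nat) :
    fpStep fx (x::cs) ((n:Int)+1) = x :: fpStep fx cs (n:Int) := by
  have h0 : (0:Int) ≤ (n:Int)+1 := by positivity
  by_cases h : n < cs.length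
  · have hg : cs[n]? = some cs[n] := List.getElem?_eq_getElem h
    simp [fpStep, h, h0, PySem.List.pyGet?, PySem.List.pySetD, PySem.List.pyIdx?, PySem.List.pySet?]
    cases fx.get? cs[n] <;> simp
  · have hg : cs[n]? = none := List.getElem?_eq_none (by omega)
    simp [fpStep, h, h0, PySem.List.pyGet?, PySem.List.pyIdx?]

theorem fpStep_one (fx : PySem.Dict Char Char) (x0 x1 : Char) (cs : List Char) :
    fpStep fx (x0::x1::cs) 1 = x0 :: ((fx.get? x1).getD x1) :: cs := by
  have h := fpStep_succ fx x0 (x1::cs) 0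
  norm_num at h
  rw [h, fpStep_zero]

theorem fpStep_two (fx : PySem.Dict Char Char) (x0 x1 x2 : Char) (cs : List Char) :
    fpStep fx (x0::x1::x2::cs) 2 = x0 :: x1 :: ((fx.get? x2).getD x2) :: cs := by
  have h := fpStep_succ fx x0 (x1::x2::cs) 1
  norm_num at h
  rw [h, fpStep_one]

theorem fpStep_three (fx : PySem.Dict Char Char) (x0 x1 x2 x3 : Char) (cs : List Char) :
    fpStep fx (x0::x1::x2::x3::cs) 3 = x0 :: x1 :: x2 :: ((fx.get? x3).getD x3) :: cs := by
  have h := fpStep_succ fx x0 (x1::x2::x3::cs) 2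
  norm_num at h
  rw [h, fpStep_two]

theorem fpStep_four (fx : PySem.Dict Char Char) (x0 x1 x2 x3 x4 : Char) (cs : List Char) :
    fpStep fx (x0::x1::x2::x3::x4::cs) 4 = x0 :: x1 :: x2 :: x3 :: ((fx.get? x4).getD x4) :: cs := by
  have h := fpStep_succ fx x0 (x1::x2::x3::x4::cs) 3
  norm_num at h
  rw [h, fpStep_three]

theorem fpStep_five (fx : PySem.Dict Char Char) (x0 x1 x2 x3 x4 x5 : Char) (cs : List Char) :
    fpStep fx (x0::x1::x2::x3::x4::x5::cs) 5 = x0 :: x1 :: x2 :: x3 :: x4 :: ((fx.get? x5).getD x5) :: cs := by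
  have h := fpStep_succ fx x0 (x1::x2::x3::x4::x5::cs) 4
  norm_num at h
  rw [h, fpStep_four]

set_option maxHeartbeats 1000000 in
theorem fix_plate_core (a b c d e f : Char) (rest : List Char) :
    fix_plate (String.ofList (a::b::c::d::e::f::rest)) =
      fix_plate_alt (String.ofList (a::b::c::d::e::f::rest)) := by
  have h6 : ¬ PySem.Str.len (String.ofList (a::b::c::d::e::f::rest)) < 6 := by
    simp [PySem.Str.len_eq]; omega
  rw [fix_plate, fix_plate_alt, if_neg h6, if_neg h6]
  simp only [String.toList_ofList, PySem.List.len_eq, List.length_cons]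
  rw [show min (3:Int) ((rest.length + 1 + 1 + 1 + 1 + 1 + 1 : Nat) : Int) = 3 from by omega]
  rw [show PySem.List.pyRange 0 3 1 = [0,1,2] from by decide]
  simp only [List.foldl_cons, List.foldl_nil]
  rw [fpStep_zero, fpStep_one, fpStep_two]
  simp only [List.length_cons]
  rw [show min (6:Int) ((rest.length + 1 + 1 + 1 + 1 + 1 + 1 : Nat) : Int) = 6 from by omega]
  rw [show PySem.List.pyRange 3 6 1 = [3,4,5] from by decide]
  simp only [List.foldl_cons, List.foldl_nil]
  rw [fpStep_three, fpStep_four, fpStep_five]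
  simp only [fpGo, fp_toLetter_eq, fp_toDigit_eq]
  norm_num
  rcases rest with _ | ⟨g, rs⟩
  · norm_num [fpGo]
  · have hc : (6:Int) < (rs.length:Int) + 1 + 1 + 1 + 1 + 1 + 1 + 1 := by omega
    simp only [fpGo]
    norm_num [hc, PySem.List.pyGet?, PySem.List.pyIdx?, PySem.List.pySetD, PySem.List.pySet?,
      fp_toLetter_eq, fpGo_seven]
    have hle : (6:Int) ≤ (rs.length:Int) + 1 + 1 + 1 + 1 + 1 + 1 := by omega
    cases hg : fpLetterFixes.get? g <;> simp [hg, hle]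

-- ===== VERDICT (by name: the statement is the Claim_ definition above) =====
theorem fix_plate_spec : Claim_equal_fix_plate := by
  intro text _
  unfold Spec_fix_plate
  match h : text.toList with
  | a::b::c::d::e::f::rest =>
      have ht : text = String.ofList (a::b::c::d::e::f::rest) := by
        rw [← h]; exact String.ofList_toList.symm
      rw [ht, fix_plate_core]
  | [] | [_] | [_,_] | [_,_,_] | [_,_,_,_] | [_,_,_,_,_] =>
      have h6 : PySem.Str.len text < 6 := by
        rw [PySem.Str.len_eq, h]; simp
      simp only [fix_plate, fix_plate_alt, if_pos h6]
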